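-- pv_equiv track=rewrite | github.com/getsentry/sentry | src/sentry/issues/auto_source_code_config/frame_info.py | remove_prefixes
-- ===== SOURCE A (Python) =====
-- PREFIXES_TO_REMOVE = ["app:///", "./", "../", "/"]
--
-- def remove_prefixes(frame_file_path: str) -> tuple[str, str]:
--     """
--     This function removes known prefixes to get a path as close to what the path would
--     look like in the source code repository.
--     """
--     removed_prefix = ""
--     for prefix in PREFIXES_TO_REMOVE:
--         if frame_file_path.startswith(prefix):
--             frame_file_path = frame_file_path.replace(prefix, "", 1)
--             frame_file_path, recursive_removed_prefix = remove_prefixes(frame_file_path)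
--             removed_prefix += prefix + recursive_removed_prefix
--
--     return frame_file_path, removed_prefix
-- ===== SOURCE B (Python) =====
-- PREFIXES_TO_REMOVE = ["app:///", "./", "../", "/"]
--
--
-- def remove_prefixes(frame_file_path: str) -> tuple[str, str]:
--     """Iteratively strip known leading prefixes, restarting the scan after each removal."""
--     removed_prefix = ""
--     while True:
--         for prefix in PREFIXES_TO_REMOVE:
--             if frame_file_path.startswith(prefix):
--                 frame_file_path = frame_file_path[len(prefix):]
--                 removed_prefix += prefix
--                 break
--         else:
--             return frame_file_path, removed_prefix
-- ===== Notes on version B (the rewrite author's own statement) =====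
-- stated objective: idiomatic
-- what changed: Replaces the self-recursive prefix stripping (recursing on the remainder inside the for loop and concatenating recursive results) with a flat while-loop that repeatedly strips the first matching prefix and accumulates it, restarting the scan after every removal.
import Mathlib
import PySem

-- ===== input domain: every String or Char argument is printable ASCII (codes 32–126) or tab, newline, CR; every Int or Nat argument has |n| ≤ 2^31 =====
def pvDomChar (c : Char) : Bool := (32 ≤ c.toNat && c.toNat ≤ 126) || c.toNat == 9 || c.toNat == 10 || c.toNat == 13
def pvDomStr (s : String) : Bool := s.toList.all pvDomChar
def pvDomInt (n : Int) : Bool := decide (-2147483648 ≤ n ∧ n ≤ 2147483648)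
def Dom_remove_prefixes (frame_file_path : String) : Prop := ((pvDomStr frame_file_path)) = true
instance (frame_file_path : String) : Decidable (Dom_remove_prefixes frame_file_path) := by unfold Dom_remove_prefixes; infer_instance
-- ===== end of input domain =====

-- B replaces A's recursion-inside-the-for-loop with a flat restart-the-scan loop and an accumulator (idiomatic; same cost).

-- ===== PORT A =====
-- PREFIXES_TO_REMOVE = ["app:///", "./", "../", "/"]  (a module constant; A's for-loop over it
-- is transcribed with its four iterations written out in order, each iteration exactly A's
-- body: if startswith → strip, recurse on the remainder, accumulate prefix + recursive part).
def pvPrefixes : List (List Char) := ["app:///".toList, "./".toList, "../".toList, "/".toList]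

-- 'frame_file_path.replace(prefix, "", 1)' is executed only under startswith, where the first
-- occurrence of prefix is the leading one, so it is exactly 'drop prefix.length' (exact there).
-- fuel is a totality guard only: every recursive call is on a strictly shorter string, so any
-- fuel > the string's length never runs out (pvGoA_spec below); the computation is A's.
def pvGoA : Nat → List Char → List Char × List Char
  | 0, s => (s, [])
  | f+1, s =>
    -- for prefix in PREFIXES_TO_REMOVE:  (the four iterations, in order)
    let r1 := if PySem.Chars.startswith s "app:///".toList then
        let t := pvGoA f (s.drop "app:///".toList.length); (t.1, "app:///".toList ++ t.2)
      else (s, [])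
    let r2 := if PySem.Chars.startswith r1.1 "./".toList then
        let t := pvGoA f (r1.1.drop "./".toList.length); (t.1, "./".toList ++ t.2)
      else (r1.1, [])
    let r3 := if PySem.Chars.startswith r2.1 "../".toList then
        let t := pvGoA f (r2.1.drop "../".toList.length); (t.1, "../".toList ++ t.2)
      else (r2.1, [])
    let r4 := if PySem.Chars.startswith r3.1 "/".toList then
        let t := pvGoA f (r3.1.drop "/".toList.length); (t.1, "/".toList ++ t.2)
      else (r3.1, [])
    (r4.1, r1.2 ++ r2.2 ++ r3.2 ++ r4.2)

def remove_prefixes (frame_file_path : String) : String × String :=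
  let t := pvGoA (frame_file_path.toList.length + 1) frame_file_path.toList
  (String.ofList t.1, String.ofList t.2)

-- ===== PORT B =====
-- the inner 'for prefix in PREFIXES_TO_REMOVE: if startswith: … break' scan
def pvFirstMatch (s : List Char) : Option (List Char) :=
  pvPrefixes.find? (fun p => PySem.Chars.startswith s p)

-- the 'while True' loop: strip the first matching prefix, accumulate it, restart the scan.
-- fuel is a totality guard only: each iteration strips a nonempty prefix, so any fuel > the
-- string's length never runs out (pvGoB_spec below); the computation is B's.
def pvGoB : Nat → List Char → List Char → List Char × List Char
  | 0, s, acc => (s, acc)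
  | f+1, s, acc =>
    match pvFirstMatch s with
    | none => (s, acc)
    | some p => pvGoB f (s.drop p.length) (acc ++ p)

def remove_prefixes_alt (frame_file_path : String) : String × String :=
  let t := pvGoB (frame_file_path.toList.length + 1) frame_file_path.toList []
  (String.ofList t.1, String.ofList t.2)

-- ===== PRECONDITION & SPEC =====
def Spec_remove_prefixes (frame_file_path : String) (out : String × String) : Prop := out = remove_prefixes_alt frame_file_path
instance (frame_file_path : String) (out : String × String) : Decidable (Spec_remove_prefixes frame_file_path out) := by unfold Spec_remove_prefixes; infer_instance

-- ===== CLAIM (what is proved, stated in full; the proofs are below) =====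
def Claim_equal_remove_prefixes : Prop := ∀ (frame_file_path : String), Dom_remove_prefixes frame_file_path → Spec_remove_prefixes frame_file_path (remove_prefixes frame_file_path)

-- ===== LEMMAS AND PROOFS =====

theorem pvL1 : "app:///".toList = ['a', 'p', 'p', ':', '/', '/', '/'] := rfl
theorem pvL2 : "./".toList = ['.', '/'] := rfl
theorem pvL3 : "../".toList = ['.', '.', '/'] := rfl
theorem pvL4 : "/".toList = ['/'] := rfl

theorem pvSW_length_le {s p : List Char} (h : PySem.Chars.startswith s p = true) :
    p.length ≤ s.length :=
  List.IsPrefix.length_le ((PySem.Chars.startswith_iff _ _).mp h)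

theorem pvPrefixes_pos : ∀ p ∈ pvPrefixes, 0 < p.length := by decide

-- proof-only reference function: strip the first matching prefix, recurse on the remainder
def pvSpecF (s : List Char) : List Char × List Char :=
  match h : pvFirstMatch s with
  | none => (s, [])
  | some p =>
      let t := pvSpecF (s.drop p.length)
      (t.1, p ++ t.2)
  termination_by s.length
  decreasing_by
    have hmem : p ∈ pvPrefixes := List.mem_of_find?_eq_some h
    have hsw : PySem.Chars.startswith s p = true := by simpa using List.find?_some h
    have h1 : p.length ≤ s.length := pvSW_length_le hsw
    have h2 := pvPrefixes_pos p hmem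
    simp only [List.length_drop]; omega

theorem pvSpecF_none {s : List Char} (h : pvFirstMatch s = none) : pvSpecF s = (s, []) := by
  rw [pvSpecF]; split <;> simp_all

theorem pvSpecF_some {s p : List Char} (h : pvFirstMatch s = some p) :
    pvSpecF s = ((pvSpecF (s.drop p.length)).1, p ++ (pvSpecF (s.drop p.length)).2) := by
  rw [pvSpecF]; split <;> simp_all

theorem pvFirstMatch_none_iff (s : List Char) :
    pvFirstMatch s = none ↔ ∀ p ∈ pvPrefixes, PySem.Chars.startswith s p = false := by
  simp [pvFirstMatch, List.find?_eq_none]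

-- the result path of the reference function is a fixed point: no prefix matches it
theorem pvSpecF_fix : ∀ (n : Nat) (s : List Char), s.length ≤ n →
    pvFirstMatch (pvSpecF s).1 = none := by
  intro n
  induction n with
  | zero =>
      intro s hs
      have hnil : s = [] := List.length_eq_zero_iff.mp (Nat.le_zero.mp hs)
      subst hnil
      rw [pvSpecF_none (by decide)]; decide
  | succ n ih =>
      intro s hs
      cases hfm : pvFirstMatch s with
      | none => rw [pvSpecF_none hfm]; exact hfm
      | some p =>
          have hmem : p ∈ pvPrefixes := List.mem_of_find?_eq_some hfm
          have hsw : PySem.Chars.startswith s p = true := by simpa using List.find?_some hfm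
          have h1 : p.length ≤ s.length := pvSW_length_le hsw
          have h2 := pvPrefixes_pos p hmem
          rw [pvSpecF_some hfm]
          exact ih _ (by simp only [List.length_drop]; omega)

-- B's loop computes the reference function, threading the accumulator
theorem pvGoB_spec : ∀ (f : Nat) (s acc : List Char), s.length < f →
    pvGoB f s acc = ((pvSpecF s).1, acc ++ (pvSpecF s).2) := by
  intro f
  induction f with
  | zero => intro s acc hs; omega
  | succ f ih =>
      intro s acc hs
      cases hfm : pvFirstMatch s with
      | none => rw [pvGoB]; rw [hfm, pvSpecF_none hfm]; simp
      | some p =>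
          have hmem : p ∈ pvPrefixes := List.mem_of_find?_eq_some hfm
          have hsw : PySem.Chars.startswith s p = true := by simpa using List.find?_some hfm
          have h1 : p.length ≤ s.length := pvSW_length_le hsw
          have h2 := pvPrefixes_pos p hmem
          have hih := ih (s.drop p.length) (acc ++ p) (by simp only [List.length_drop]; omega)
          rw [pvGoB, hfm]
          simp only [hih, pvSpecF_some hfm]
          simp

-- A's unrolled scan also computes the reference function
theorem pvGoA_spec : ∀ (n : Nat) (s : List Char) (f : Nat), s.length ≤ n → s.length < f →
    pvGoA f s = pvSpecF s := by
  intro n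
  induction n with
  | zero =>
      intro s f hs hf
      have hnil : s = [] := List.length_eq_zero_iff.mp (Nat.le_zero.mp hs)
      subst hnil
      cases f with
      | zero => omega
      | succ f =>
          rw [pvGoA, pvSpecF_none (by decide)]
          simp [show PySem.Chars.startswith ([] : List Char) ['a', 'p', 'p', ':', '/', '/', '/'] = false by decide,
            show PySem.Chars.startswith ([] : List Char) ['.', '/'] = false by decide,
            show PySem.Chars.startswith ([] : List Char) ['.', '.', '/'] = false by decide,
            show PySem.Chars.startswith ([] : List Char) ['/'] = false by decide]
  | succ n ih =>
      intro s f hs hf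
      cases f with
      | zero => omega
      | succ f =>
          rw [pvGoA]
          cases hfm : pvFirstMatch s with
          | none =>
              have hall := (pvFirstMatch_none_iff s).mp hfm
              rw [pvSpecF_none hfm]
              have hy1 : PySem.Chars.startswith s ['a', 'p', 'p', ':', '/', '/', '/'] = false := hall _ (by decide)
              have hy2 : PySem.Chars.startswith s ['.', '/'] = false := hall _ (by decide)
              have hy3 : PySem.Chars.startswith s ['.', '.', '/'] = false := hall _ (by decide)
              have hy4 : PySem.Chars.startswith s ['/'] = false := hall _ (by decide)
              simp [hy1, hy2, hy3, hy4]
          | some p =>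
              have hmem : p ∈ pvPrefixes := List.mem_of_find?_eq_some hfm
              have hsw : PySem.Chars.startswith s p = true := by simpa using List.find?_some hfm
              have hplen : p.length ≤ s.length := pvSW_length_le hsw
              have hppos := pvPrefixes_pos p hmem
              have hdrop : (s.drop p.length).length ≤ n := by
                simp only [List.length_drop]; omega
              have hrec : pvGoA f (s.drop p.length) = pvSpecF (s.drop p.length) :=
                ih _ f hdrop (by simp only [List.length_drop]; omega)
              have hfixall := (pvFirstMatch_none_iff _).mp (pvSpecF_fix n _ hdrop)
              have hx1 : PySem.Chars.startswith (pvSpecF (s.drop p.length)).1 ['a', 'p', 'p', ':', '/', '/', '/'] = false :=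
                hfixall _ (by decide)
              have hx2 : PySem.Chars.startswith (pvSpecF (s.drop p.length)).1 ['.', '/'] = false :=
                hfixall _ (by decide)
              have hx3 : PySem.Chars.startswith (pvSpecF (s.drop p.length)).1 ['.', '.', '/'] = false :=
                hfixall _ (by decide)
              have hx4 : PySem.Chars.startswith (pvSpecF (s.drop p.length)).1 ['/'] = false :=
                hfixall _ (by decide)
              rw [pvSpecF_some hfm]
              cases h1 : PySem.Chars.startswith s ['a', 'p', 'p', ':', '/', '/', '/'] with
              | true =>
                  have hpe : p = ['a', 'p', 'p', ':', '/', '/', '/'] := by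
                    unfold pvFirstMatch pvPrefixes at hfm
                    simp only [pvL1, pvL2, pvL3, pvL4] at hfm
                    rw [List.find?_cons_of_pos (h := h1)] at hfm
                    exact (Option.some_inj.mp hfm).symm
                  subst hpe
                  simp at hrec hx1 hx2 hx3 hx4
                  simp [h1, hrec, hx2, hx3, hx4]
              | false =>
              cases h2 : PySem.Chars.startswith s ['.', '/'] with
              | true =>
                  have hpe : p = ['.', '/'] := by
                    unfold pvFirstMatch pvPrefixes at hfm
                    simp only [pvL1, pvL2, pvL3, pvL4] at hfm
                    rw [List.find?_cons_of_neg (h := by simpa using h1),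
                      List.find?_cons_of_pos (h := h2)] at hfm
                    exact (Option.some_inj.mp hfm).symm
                  subst hpe
                  simp at hrec hx1 hx2 hx3 hx4
                  simp [h1, h2, hrec, hx3, hx4]
              | false =>
              cases h3 : PySem.Chars.startswith s ['.', '.', '/'] with
              | true =>
                  have hpe : p = ['.', '.', '/'] := by
                    unfold pvFirstMatch pvPrefixes at hfm
                    simp only [pvL1, pvL2, pvL3, pvL4] at hfm
                    rw [List.find?_cons_of_neg (h := by simpa using h1),
                      List.find?_cons_of_neg (h := by simpa using h2),
                      List.find?_cons_of_pos (h := h3)] at hfm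
                    exact (Option.some_inj.mp hfm).symm
                  subst hpe
                  simp at hrec hx1 hx2 hx3 hx4
                  simp [h1, h2, h3, hrec, hx4]
              | false =>
              cases h4 : PySem.Chars.startswith s ['/'] with
              | true =>
                  have hpe : p = ['/'] := by
                    unfold pvFirstMatch pvPrefixes at hfm
                    simp only [pvL1, pvL2, pvL3, pvL4] at hfm
                    rw [List.find?_cons_of_neg (h := by simpa using h1),
                      List.find?_cons_of_neg (h := by simpa using h2),
                      List.find?_cons_of_neg (h := by simpa using h3),
                      List.find?_cons_of_pos (h := h4)] at hfm
                    exact (Option.some_inj.mp hfm).symm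
                  subst hpe
                  simp at hrec hx1 hx2 hx3 hx4
                  simp [h1, h2, h3, h4, hrec]
              | false =>
                  have : pvFirstMatch s = none := by
                    unfold pvFirstMatch pvPrefixes
                    simp only [pvL1, pvL2, pvL3, pvL4]
                    rw [List.find?_cons_of_neg (h := by simpa using h1),
                      List.find?_cons_of_neg (h := by simpa using h2),
                      List.find?_cons_of_neg (h := by simpa using h3),
                      List.find?_cons_of_neg (h := by simpa using h4)]
                    rfl
                  simp [this] at hfm

-- ===== VERDICT (by name: the statement is the Claim_ definition above) =====
theorem remove_prefixes_spec : Claim_equal_remove_prefixes := by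
  intro s _
  unfold Spec_remove_prefixes remove_prefixes remove_prefixes_alt
  rw [pvGoA_spec s.toList.length s.toList _ (Nat.le_refl _) (Nat.lt_succ_self _),
    pvGoB_spec _ _ _ (Nat.lt_succ_self _)]
  simp
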